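-- pv_equiv track=rewrite | github.com/lcsig/Sequence-Searcher | search_engine/seq_calc.py | seq_adjacent_terms_sum
-- ===== SOURCE A (Python) =====
-- def seq_adjacent_terms_sum(sequence: list, sum_level: int):
--     """
--     A function to extract the sums of adjacent terms
--     sequence: A list of integers that contains the sequence
--     sum_level: The level indicates the number of times the operation will be applied on the sequence
--     return: A list of list of integers that contains the sequence after extracting the sums
--     """
--     seq = sequence
--     list_ret = [[0]] * sum_level
--
--     for idx in range(0, sum_level):
--         sum_seq = [0] * (len(seq) - 1)
--         for n in range(1, len(seq)):
--             sum_seq[n - 1] = seq[n] + seq[n - 1]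
--
--         list_ret[idx] = sum_seq
--         seq = sum_seq
--
--     return list_ret
-- ===== SOURCE B (Python) =====
-- def seq_adjacent_terms_sum(sequence, sum_level):
--     # Binomial-convolution form: level L is computed directly from the
--     # original sequence using Pascal's-triangle row L, not from level L-1.
--     result = []
--     row = [1]
--     for _ in range(sum_level):
--         if len(row) >= len(sequence):
--             # this level and every later one is empty; no need to grow the row
--             result.append([])
--             continue
--         row = [a + b for a, b in zip(row + [0], [0] + row)]
--         n = len(sequence) - len(row) + 1
--         result.append([sum(c * sequence[i + j] for j, c in enumerate(row))
--                        for i in range(n)])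
--     return result
-- ===== Notes on version B (the rewrite author's own statement) =====
-- stated objective: alternative
-- what changed: Each level is computed directly from the original sequence as a binomial convolution with the corresponding Pascal's-triangle row, instead of repeatedly folding the previous level's adjacent sums.
import Mathlib
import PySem

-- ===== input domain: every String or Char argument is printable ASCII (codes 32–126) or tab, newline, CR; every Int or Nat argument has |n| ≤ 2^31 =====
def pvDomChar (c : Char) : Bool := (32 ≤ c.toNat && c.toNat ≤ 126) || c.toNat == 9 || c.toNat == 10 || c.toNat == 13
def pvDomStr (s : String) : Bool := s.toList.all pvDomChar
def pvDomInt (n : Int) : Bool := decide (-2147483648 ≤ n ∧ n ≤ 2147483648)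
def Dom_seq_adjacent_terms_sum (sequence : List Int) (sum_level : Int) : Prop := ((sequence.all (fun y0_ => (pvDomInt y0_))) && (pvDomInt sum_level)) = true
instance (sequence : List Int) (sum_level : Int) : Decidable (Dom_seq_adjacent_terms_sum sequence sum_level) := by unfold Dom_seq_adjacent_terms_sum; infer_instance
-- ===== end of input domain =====

-- B computes each level directly from the original sequence by binomial convolution
-- (Pascal's-triangle rows) instead of folding the previous level; objective: alternative.

-- ===== PORT A =====
-- inner loop of A: sum_seq = [0]*(len(seq)-1); for n in range(1,len(seq)): sum_seq[n-1] = seq[n] + seq[n-1]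
-- (indices n, n-1 are nonnegative and in range, so .set/.pyGetD are exact here)
def pvInnerLoop (seq : List Int) : List Int :=
  (PySem.List.pyRange 1 (seq.length : Int) 1).foldl
    (fun ss n => ss.set (n - 1).toNat (PySem.List.pyGetD seq n 0 + PySem.List.pyGetD seq (n - 1) 0))
    (List.replicate (seq.length - 1) (0 : Int))

def seq_adjacent_terms_sum (sequence : List Int) (sum_level : Int) : List (List Int) :=
  -- list_ret = [[0]] * sum_level; for idx in range(0, sum_level): list_ret[idx] = sum_seq; seq = sum_seq
  ((PySem.List.pyRange 0 sum_level 1).foldl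
    (fun (st : List (List Int) × List Int) idx =>
      (st.1.set idx.toNat (pvInnerLoop st.2), pvInnerLoop st.2))
    (List.replicate sum_level.toNat ([0] : List Int), sequence)).1

-- ===== PORT B =====
-- next Pascal row: [a+b for a,b in zip(row+[0], [0]+row)]
def pvNextRow (r : List Int) : List Int := List.zipWith (· + ·) (r ++ [0]) (0 :: r)

-- sum(c * sequence[i+j] for j, c in enumerate(row))  (structural recursion over row; indices in range)
def pvConvAt : List Int → List Int → Nat → Int
  | [], _, _ => 0
  | c :: r, seq, i => c * seq.getD i 0 + pvConvAt r seq (i + 1)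

-- [sum(...) for i in range(len(sequence) - len(row) + 1)]
def pvLevelRow (sequence row : List Int) : List Int :=
  (List.range ((sequence.length : Int) - (row.length : Int) + 1).toNat).map
    (fun i => pvConvAt row sequence i)

def seq_adjacent_terms_sum_alt (sequence : List Int) (sum_level : Int) : List (List Int) :=
  -- if len(row) >= len(sequence): result.append([]); continue — else grow the row and convolve
  ((PySem.List.pyRange 0 sum_level 1).foldl
    (fun (st : List Int × List (List Int)) _ =>
      if sequence.length ≤ st.1.length then (st.1, st.2 ++ [[]])
      else (pvNextRow st.1, st.2 ++ [pvLevelRow sequence (pvNextRow st.1)]))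
    (([1] : List Int), ([] : List (List Int)))).2

-- ===== PRECONDITION & SPEC =====
def Spec_seq_adjacent_terms_sum (sequence : List Int) (sum_level : Int) (out : List (List Int)) : Prop := out = seq_adjacent_terms_sum_alt sequence sum_level
instance (sequence : List Int) (sum_level : Int) (out : List (List Int)) : Decidable (Spec_seq_adjacent_terms_sum sequence sum_level out) := by unfold Spec_seq_adjacent_terms_sum; infer_instance

-- ===== CLAIM (what is proved, stated in full; the proofs are below) =====
def Claim_equal_seq_adjacent_terms_sum : Prop := ∀ (sequence : List Int) (sum_level : Int), Dom_seq_adjacent_terms_sum sequence sum_level → Spec_seq_adjacent_terms_sum sequence sum_level (seq_adjacent_terms_sum sequence sum_level)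

-- ===== LEMMAS AND PROOFS =====

-- adjacent-sum of a list: element i is s[i+1] + s[i]
def pvAdj (s : List Int) : List Int := List.zipWith (· + ·) s.tail s

-- k iterations of pvAdj, collecting each intermediate list
def pvLevels : Nat → List Int → List (List Int)
  | 0, _ => []
  | k + 1, s => pvAdj s :: pvLevels k (pvAdj s)

-- B's levels from a given Pascal row
def pvRows (sequence : List Int) : Nat → List Int → List (List Int)
  | 0, _ => []
  | j + 1, r =>
    if sequence.length ≤ r.length then [] :: pvRows sequence j r
    else pvLevelRow sequence (pvNextRow r) :: pvRows sequence j (pvNextRow r)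

lemma pv_take_succ_set {α : Type} (xs : List α) : ∀ (k : Nat) (v : α), k < xs.length →
    (xs.set k v).take (k + 1) = xs.take k ++ [v] := by
  induction xs with
  | nil => intro k v h; simp at h
  | cons a t ih =>
    intro k v h
    cases k with
    | zero => simp
    | succ k => simp [ih k v (by simpa using h)]

lemma pvAdj_length (s : List Int) : (pvAdj s).length = s.length - 1 := by
  simp [pvAdj]

lemma pvAdj_getElem (s : List Int) (i : Nat) (h : i < (pvAdj s).length) :
    (pvAdj s)[i] = s[i + 1]'(by simp [pvAdj] at h; omega) + s[i]'(by simp [pvAdj] at h; omega) := by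
  simp only [pvAdj, List.getElem_zipWith, List.getElem_tail]

lemma pvInner_aux (s : List Int) : ∀ (j : Nat) (k : Int) (ss : List Int),
    ((s.length : Int) - k).toNat = j → 1 ≤ k → ss.length = s.length - 1 →
    ((PySem.List.pyRange k (s.length : Int) 1).foldl
      (fun ss n => ss.set (n - 1).toNat (PySem.List.pyGetD s n 0 + PySem.List.pyGetD s (n - 1) 0)) ss)
    = ss.take (k - 1).toNat ++ (pvAdj s).drop (k - 1).toNat := by
  intro j
  induction j with
  | zero =>
    intro k ss hj hk hlen
    rw [PySem.List.pyRange_one_eq_nil (by omega)]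
    simp only [List.foldl_nil]
    rw [List.take_of_length_le (by omega), List.drop_eq_nil_of_le (by rw [pvAdj_length]; omega)]
    simp
  | succ j ih =>
    intro k ss hj hk hlen
    have hklt : k < (s.length : Int) := by omega
    rw [PySem.List.pyRange_one_cons hklt]
    simp only [List.foldl_cons]
    rw [ih (k + 1) _ (by omega) (by omega) (by simpa using hlen)]
    have hidx : (k - 1).toNat < ss.length := by omega
    have hidx' : (k - 1).toNat < (pvAdj s).length := by rw [pvAdj_length]; omega
    have h1 : (k + 1 - 1).toNat = (k - 1).toNat + 1 := by omega
    rw [h1, pv_take_succ_set ss _ _ hidx]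
    have hkk : k.toNat = (k - 1).toNat + 1 := by omega
    have hdrop : (pvAdj s).drop (k - 1).toNat = (pvAdj s)[(k - 1).toNat] :: (pvAdj s).drop (k.toNat) := by
      rw [List.drop_eq_getElem_cons hidx', hkk]
    have hg1 : PySem.List.pyGetD s k 0 = s[k.toNat]'(by omega) := by
      rw [PySem.List.pyGetD_eq_getElem] <;> omega
    have hg2 : PySem.List.pyGetD s (k - 1) 0 = s[(k - 1).toNat]'(by omega) := by
      rw [PySem.List.pyGetD_eq_getElem] <;> omega
    rw [hdrop, pvAdj_getElem s _ hidx', hg1, hg2]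
    have hk2 : k.toNat - 1 + 1 = k.toNat := by omega
    simp [List.append_assoc, hk2]

lemma pvInner_eq (s : List Int) : pvInnerLoop s = pvAdj s := by
  unfold pvInnerLoop
  rw [pvInner_aux s ((s.length : Int) - 1).toNat 1 _ rfl (by omega) (by simp)]
  simp

lemma pvOuter_aux (M : Int) : ∀ (j : Nat) (k : Int) (ret : List (List Int)) (s : List Int),
    (M - k).toNat = j → 0 ≤ k → ret.length = M.toNat →
    ((PySem.List.pyRange k M 1).foldl
      (fun (st : List (List Int) × List Int) idx =>
        (st.1.set idx.toNat (pvInnerLoop st.2), pvInnerLoop st.2)) (ret, s)).1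
    = ret.take k.toNat ++ pvLevels (M - k).toNat s := by
  intro j
  induction j with
  | zero =>
    intro k ret s hj hk hlen
    rw [PySem.List.pyRange_one_eq_nil (by omega)]
    simp only [List.foldl_nil]
    rw [hj, List.take_of_length_le (by omega)]
    simp [pvLevels]
  | succ j ih =>
    intro k ret s hj hk hlen
    have hklt : k < M := by omega
    rw [PySem.List.pyRange_one_cons hklt]
    simp only [List.foldl_cons]
    rw [ih (k + 1) _ _ (by omega) (by omega) (by simpa using hlen)]
    have hidx : k.toNat < ret.length := by omega
    have h1 : (k + 1).toNat = k.toNat + 1 := by omega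
    rw [h1, pv_take_succ_set ret _ _ hidx, pvInner_eq]
    have h2 : (M - k).toNat = (M - (k + 1)).toNat + 1 := by omega
    rw [h2]
    simp [pvLevels, List.append_assoc]

lemma pvA_eq (sequence : List Int) (sum_level : Int) :
    seq_adjacent_terms_sum sequence sum_level = pvLevels sum_level.toNat sequence := by
  unfold seq_adjacent_terms_sum
  rw [pvOuter_aux sum_level (sum_level - 0).toNat 0 _ _ rfl (by omega) (by simp)]
  simp

lemma pvConvAt_zip (seq : List Int) : ∀ (r : List Int) (d : Int) (i : Nat),
    pvConvAt (List.zipWith (· + ·) (r ++ [0]) (d :: r)) seq i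
    = d * seq.getD i 0 + pvConvAt r seq i + pvConvAt r seq (i + 1) := by
  intro r
  induction r with
  | nil => intro d i; simp [pvConvAt]
  | cons c r ih =>
    intro d i
    simp only [List.cons_append, List.zipWith_cons_cons, pvConvAt, ih c (i + 1)]
    ring

lemma pvNextRow_length (r : List Int) : (pvNextRow r).length = r.length + 1 := by
  simp [pvNextRow]

lemma pvLevelRow_next (sequence r : List Int) :
    pvLevelRow sequence (pvNextRow r) = pvAdj (pvLevelRow sequence r) := by
  apply List.ext_getElem
  · simp [pvLevelRow, pvAdj_length, pvNextRow_length]; omega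
  · intro i h1 h2
    have hi : i < ((sequence.length : Int) - (r.length : Int) + 1).toNat - 1 := by
      simp [pvLevelRow, pvNextRow_length] at h1; omega
    have hlen : (pvLevelRow sequence r).length = ((sequence.length : Int) - (r.length : Int) + 1).toNat := by
      simp [pvLevelRow]
    rw [pvAdj_getElem]
    simp only [pvLevelRow, pvNextRow, List.getElem_map, List.getElem_range]
    rw [pvConvAt_zip]
    ring

lemma pvLevelRow_one (sequence : List Int) : pvLevelRow sequence [1] = sequence := by
  apply List.ext_getElem
  · simp [pvLevelRow]
  · intro i h1 h2
    simp [pvLevelRow, pvConvAt, List.getD_eq_getElem?_getD, List.getElem?_eq_getElem h2]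

lemma pvAdj_small (x : List Int) (h : x.length ≤ 1) : pvAdj x = [] := by
  match x, h with
  | [], _ => rfl
  | [a], _ => rfl

lemma pvLevels_small : ∀ (j : Nat) (x : List Int), x.length ≤ 1 → pvLevels j x = List.replicate j [] := by
  intro j
  induction j with
  | zero => intro x _; rfl
  | succ j ih =>
    intro x hx
    simp [pvLevels, pvAdj_small x hx, ih [] (by simp), List.replicate_succ]

lemma pvRows_eq_levels (sequence : List Int) : ∀ (j : Nat) (r : List Int),
    pvRows sequence j r = pvLevels j (pvLevelRow sequence r) := by
  intro j
  induction j with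
  | zero => intro r; rfl
  | succ j ih =>
    intro r
    by_cases hg : sequence.length ≤ r.length
    · have hlvl : (pvLevelRow sequence r).length ≤ 1 := by simp [pvLevelRow]; omega
      simp only [pvRows, hg, if_true, pvLevels, pvAdj_small _ hlvl, ih]
      rw [pvLevels_small j _ hlvl, pvLevels_small j [] (by simp)]
    · simp [pvRows, hg, pvLevels, ih, pvLevelRow_next]

lemma pvB_aux (sequence : List Int) (M : Int) : ∀ (j : Nat) (k : Int) (row : List Int) (acc : List (List Int)),
    (M - k).toNat = j →
    ((PySem.List.pyRange k M 1).foldl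
      (fun (st : List Int × List (List Int)) _ =>
        if sequence.length ≤ st.1.length then (st.1, st.2 ++ [[]])
        else (pvNextRow st.1, st.2 ++ [pvLevelRow sequence (pvNextRow st.1)])) (row, acc)).2
    = acc ++ pvRows sequence j row := by
  intro j
  induction j with
  | zero =>
    intro k row acc hj
    rw [PySem.List.pyRange_one_eq_nil (by omega)]
    simp [pvRows]
  | succ j ih =>
    intro k row acc hj
    rw [PySem.List.pyRange_one_cons (by omega)]
    simp only [List.foldl_cons]
    by_cases hg : sequence.length ≤ row.length
    · simp only [hg, if_pos]
      rw [ih (k + 1) _ _ (by omega)]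
      simp [pvRows, hg, List.append_assoc]
    · simp only [hg, if_neg, not_false_iff]
      rw [ih (k + 1) _ _ (by omega)]
      simp [pvRows, hg, List.append_assoc]

lemma pvB_eq (sequence : List Int) (sum_level : Int) :
    seq_adjacent_terms_sum_alt sequence sum_level = pvLevels sum_level.toNat sequence := by
  unfold seq_adjacent_terms_sum_alt
  rw [pvB_aux sequence sum_level (sum_level - 0).toNat 0 _ _ rfl]
  rw [pvRows_eq_levels, pvLevelRow_one]
  simp

-- ===== VERDICT (by name: the statement is the Claim_ definition above) =====
theorem seq_adjacent_terms_sum_spec : Claim_equal_seq_adjacent_terms_sum := by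
  intro sequence sum_level _
  unfold Spec_seq_adjacent_terms_sum
  rw [pvA_eq, pvB_eq]
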